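-- PySemCore.lean, part 5 of 8 (source lines 1488-1895 of 3059): List (4/4): 'cite, don't re-derive' lemmas - indexing a comprehension, xs[i] at 0 <= i, 0/1-sums and counting.
-- An excerpt: the file's own header and imports are repeated below, the enclosing namespaces are reopened, and the other parts are separate documents.
import Lean.Meta.Tactic.Simp.RegisterCommand
/-
PySem — Python-exact primitives for the program-equivalence environment (pv_equiv).

A Lean port of a Python function should compute what the Python computes on every
admitted input. Ports diverge from their Python almost always at a dozen built-ins
(negative indexing, slicing, // and % with a negative divisor, dict overwrite order,
int() parsing, stable sort, min/max ties, the whitespace/digit/case sets of str), not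
in the algorithm. This module implements exactly those built-ins with CPython's
semantics (reference: CPython 3.13), so a port can call them instead of re-inventing
them. Where Python RAISES, the primitive returns `Option` (none = the exception) and a
decidable side condition in `PySem.Raise` names the inputs on which it does not, for
the port's `Pre_`.

Core Lean plus one Lean-frontend module for the `pysem` simp-set registration (no Mathlib import): it compiles in about a minute wherever the grader runs.
Every definition is computable; the `@[simp]` lemmas and the bridge lemmas reduce the
primitives to the usual List/Int/String functions under the side condition that makes
them agree, so proofs about honest ports stay in familiar territory. String functions
are exact on the environment's stated input domain (printable ASCII); outside it the
Unicode tables are not modelled in this version.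

GRADER CODE: kernel-checked, differentially tested against CPython (tests/), trusted.
-/

/-- The `pysem` simp set: every PySem lemma (tagged at the end of PySem.lean — an attribute cannot be used in the module that
registers it), so `simp only [pysem]` / `simp [pysem, …]` tries the whole prelude book without the author knowing each name.
(This import is the one non-core dependency of this file; it costs ≈50 s of compile per container — a third tiny module would
avoid it and is the planned refinement.) -/
register_simp_attr pysem

namespace PySem
namespace List
variable {α : Type}

/-! ### Lemma pack 6 — 'cite, don't re-derive': indexing a comprehension, xs[i] at 0 ≤ i, 0/1-sums as counts, general-step range,
max with a default, bisect. (Several are one-liners over core lemmas; they exist so a port cites ONE name instead of re-proving it.) -/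
section Pack6
variable {β : Type}

/-- 'for x in l: acc.append(x)' — the name ports reach for (= foldl_append_singleton_eq_self). -/
theorem foldl_append_singleton (l acc : _root_.List α) : l.foldl (fun acc x => acc ++ [x]) acc = acc ++ l :=
  foldl_append_singleton_eq_self l acc
/-- 'n = a; for x in l: if p(x): n += 1' — the name ports reach for (= foldl_if_add_one). -/
theorem foldl_count_if (p : α → Bool) (l : _root_.List α) (a : _root_.Int) :
    l.foldl (fun acc x => if p x then acc + 1 else acc) a = a + (l.countP p : _root_.Int) := foldl_if_add_one p l a

/-- [f(i) for i in range(m)][i] at a Nat index over core's range: f i. -/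
theorem getD_map_range (f : Nat → β) (m i : Nat) (d : β) (h : i < m) : ((_root_.List.range m).map f).getD i d = f i := by
  simp [_root_.List.getD_eq_getElem?_getD, h]
/-- [f(x) for x in xs][i] with the matching default: map commutes with getD at EVERY index (no range hypothesis). -/
theorem getD_map (f : α → β) (xs : _root_.List α) (i : Nat) (d : α) : (xs.map f).getD i (f d) = f (xs.getD i d) := by
  simp only [_root_.List.getD_eq_getElem?_getD, _root_.List.getElem?_map]
  cases xs[i]? <;> rfl
/-- [f(x) for x in xs][i] in range is f xs[i]. -/
theorem getD_map_of_lt (f : α → β) (xs : _root_.List α) (i : Nat) (d : β) (h : i < xs.length) : (xs.map f).getD i d = f xs[i] := by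
  simp [_root_.List.getD_eq_getElem?_getD, h]
/-- xs[i] in range at a Nat index is the element (getD form of getElem). -/
theorem getD_eq_getElem_of_lt (xs : _root_.List α) (i : Nat) (d : α) (h : i < xs.length) : xs.getD i d = xs[i] := by
  simp [_root_.List.getD_eq_getElem?_getD, h]

/-- xs[i] for 0 ≤ i is core's getD at i.toNat (d past the end on both sides). -/
theorem pyGetD_of_nonneg (xs : _root_.List α) {i : _root_.Int} (d : α) (h : 0 ≤ i) : pyGetD xs i d = xs.getD i.toNat d := by
  obtain ⟨n, rfl⟩ := Int.eq_ofNat_of_zero_le h; simp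
/-- [f(x) for x in xs][i] = f(xs[i]) at EVERY Int index when the defaults match (negative and out-of-range included). -/
theorem pyGetD_map (f : α → β) (xs : _root_.List α) (i : _root_.Int) (d : α) : pyGetD (xs.map f) i (f d) = f (pyGetD xs i d) := by
  unfold pyGetD pyGet?
  simp only [_root_.List.length_map]
  cases pyIdx? xs.length i with
  | none => rfl
  | some k => simp only [Option.bind_some, _root_.List.getElem?_map]; cases xs[k]? <;> rfl
/-- [f(x) for x in xs][n] at an in-range natural index. -/
theorem pyGetD_map_natCast (f : α → β) (xs : _root_.List α) (n : Nat) (d : β) (h : n < xs.length) :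
    pyGetD (xs.map f) (n : _root_.Int) d = f xs[n] := by
  simp [_root_.List.getD_eq_getElem?_getD, h]
/-- [f(x) for x in xs][i] at an in-range Int index 0 ≤ i < len. -/
theorem pyGetD_map_of_nonneg (f : α → β) (xs : _root_.List α) {i : _root_.Int} (d : β) (h0 : 0 ≤ i) (h1 : i < xs.length) :
    pyGetD (xs.map f) i d = f (xs[i.toNat]'(by omega)) := by
  obtain ⟨n, rfl⟩ := Int.eq_ofNat_of_zero_le h0
  have hn : n < xs.length := by omega
  simp [_root_.List.getD_eq_getElem?_getD, hn]
/-- xs[2], xs[3], … with a NUMERAL index (the '_natCast' lemmas match a cast '(n : Int)', not a numeral). -/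
theorem pyGetD_ofNat' (xs : _root_.List α) (k : Nat) (d : α) : pyGetD xs (no_index (OfNat.ofNat k) : _root_.Int) d = xs.getD k d :=
  pyGetD_natCast xs k d
theorem pyGet?_ofNat' (xs : _root_.List α) (k : Nat) : pyGet? xs (no_index (OfNat.ofNat k) : _root_.Int) = xs[k]? :=
  pyGet?_natCast xs k

/-- 'for i in range(len(xs)): … f(xs[i]) …' as a comprehension is the comprehension over the elements. Cite with f given explicitly —
'rw [map_pyRange_zero_pyGetD xs d (fun v => v + 1)]' — simp will not find it for a compound body. -/
theorem map_pyRange_zero_pyGetD (xs : _root_.List α) (d : α) (f : α → β) :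
    (pyRange 0 (len xs) 1).map (fun j => f (pyGetD xs j d)) = xs.map f := by
  rw [show (fun j => f (pyGetD xs j d)) = f ∘ (fun j => pyGetD xs j d) from rfl, ← _root_.List.map_map, map_pyGetD_pyRange_zero]
theorem map_pyRange_zero_pyGetD' (xs : _root_.List α) (d : α) (f : α → β) :
    (pyRange 0 (xs.length : _root_.Int) 1).map (fun j => f (pyGetD xs j d)) = xs.map f := map_pyRange_zero_pyGetD xs d f

/-- sum(1 for x in xs if p(x)) / sum(p(x) for x in xs): a 0/1-sum is a count (Int, Bool test). -/
theorem sum_map_ite_one_zero (p : α → Bool) (xs : _root_.List α) :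
    (xs.map (fun x => if p x then (1 : _root_.Int) else 0)).sum = (xs.countP p : _root_.Int) := by
  induction xs with
  | nil => simp
  | cons x t ih => cases hp : p x <;> simp [hp, ih] <;> omega
/-- the same with a Prop test. -/
theorem sum_map_ite_one_zero' (p : α → Prop) [DecidablePred p] (xs : _root_.List α) :
    (xs.map (fun x => if p x then (1 : _root_.Int) else 0)).sum = (xs.countP (fun x => decide (p x)) : _root_.Int) := by
  induction xs with
  | nil => simp
  | cons x t ih => by_cases hp : p x <;> simp [hp, ih] <;> omega
/-- Nat-valued 0/1-sums. -/
theorem sum_map_ite_one_zero_nat (p : α → Bool) (xs : _root_.List α) :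
    (xs.map (fun x => if p x then (1 : Nat) else 0)).sum = xs.countP p := by
  induction xs with
  | nil => simp
  | cons x t ih => cases hp : p x <;> simp [hp, ih] <;> omega
theorem sum_map_ite_one_zero_nat' (p : α → Prop) [DecidablePred p] (xs : _root_.List α) :
    (xs.map (fun x => if p x then (1 : Nat) else 0)).sum = xs.countP (fun x => decide (p x)) := by
  induction xs with
  | nil => simp
  | cons x t ih => by_cases hp : p x <;> simp [hp, ih] <;> omega
/-- sum(int(b) for b in bools) with Bool.toNat. -/
theorem sum_map_toNat (p : α → Bool) (xs : _root_.List α) : (xs.map (fun x => (p x).toNat)).sum = xs.countP p := by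
  induction xs with
  | nil => simp
  | cons x t ih => cases hp : p x <;> simp [hp, ih] <;> omega
/-- sum(c for _ in xs) is len(xs) * c. -/
theorem sum_map_const_int (xs : _root_.List α) (c : _root_.Int) : (xs.map (fun _ => c)).sum = (xs.length : _root_.Int) * c := by
  induction xs with
  | nil => simp
  | cons x t ih => simp [ih, Int.add_mul, Int.add_comm]
theorem sum_map_const_nat (xs : _root_.List α) (c : Nat) : (xs.map (fun _ => c)).sum = xs.length * c := by
  induction xs with
  | nil => simp
  | cons x t ih => simp [ih, Nat.add_mul, Nat.add_comm]
/-- sum over an appended element (the loop step of 'total += x' read back as a sum). -/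
theorem sum_append_singleton_int (xs : _root_.List _root_.Int) (x : _root_.Int) : (xs ++ [x]).sum = xs.sum + x := by
  simp
/-- sum(f(x) + g(x) for x in xs) splits. -/
theorem sum_map_add_int (xs : _root_.List α) (f g : α → _root_.Int) :
    (xs.map (fun x => f x + g x)).sum = (xs.map f).sum + (xs.map g).sum := by
  induction xs with
  | nil => simp
  | cons x t ih => simp [ih]; omega
/-- sum(c * f(x) for x in xs) = c * sum(...). -/
theorem sum_map_const_mul_int (xs : _root_.List α) (c : _root_.Int) (f : α → _root_.Int) :
    (xs.map (fun x => c * f x)).sum = c * (xs.map f).sum := by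
  induction xs with
  | nil => simp
  | cons x t ih => simp [ih, Int.mul_add]

/-- range(n) with n a natural, under the name ports reach for (= pyRange_zero_nat). -/
theorem pyRange_zero_natCast (n : Nat) : pyRange 0 (n : _root_.Int) 1 = (_root_.List.range n).map fun (k : Nat) => (k : _root_.Int) :=
  pyRange_zero_nat n
/-- range(a, b, s) for a POSITIVE step as an explicit map over core's range: a, a+s, a+2s, … (count = ceil((b-a)/s), 0 if b ≤ a). -/
theorem pyRange_of_pos (a b : _root_.Int) {s : _root_.Int} (hs : 0 < s) :
    pyRange a b s = (_root_.List.range (if a < b then ((b - a + s - 1) / s).toNat else 0)).map fun (k : Nat) => a + s * (k : _root_.Int) := by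
  unfold pyRange
  have h1 : s ≠ 0 := by omega
  simp [h1, hs]
/-- range(a, b, s) for a NEGATIVE step: a, a+s, … counting down (count = ceil((a-b)/(-s)), 0 if a ≤ b). -/
theorem pyRange_of_neg (a b : _root_.Int) {s : _root_.Int} (hs : s < 0) :
    pyRange a b s = (_root_.List.range (if b < a then ((a - b + (-s) - 1) / (-s)).toNat else 0)).map fun (k : Nat) => a + s * (k : _root_.Int) := by
  unfold pyRange
  have h1 : s ≠ 0 := by omega
  have h2 : ¬ 0 < s := by omega
  simp [h1, h2]
/-- every element of range(a, b, s), s > 0, lies in [a, b) and is a + s*k. -/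
theorem mem_pyRange_of_pos {a b s x : _root_.Int} (hs : 0 < s) (hx : x ∈ pyRange a b s) : a ≤ x ∧ x < b ∧ ∃ k : Nat, x = a + s * k := by
  rw [pyRange_of_pos a b hs, _root_.List.mem_map] at hx
  obtain ⟨k, hk, rfl⟩ := hx
  rw [_root_.List.mem_range] at hk
  split at hk
  · rename_i hab
    refine ⟨by have := Int.mul_nonneg (Int.le_of_lt hs) (Int.natCast_nonneg k); omega, ?_, k, rfl⟩
    have hk' : (k : _root_.Int) + 1 ≤ (b - a + s - 1) / s := by omega
    have := (Int.le_ediv_iff_mul_le hs).mp hk'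
    have e : ((k : _root_.Int) + 1) * s = s * k + s := by rw [Int.add_mul, Int.one_mul, Int.mul_comm]
    omega
  · omega
/-- every element of range(a, b, s), s < 0, lies in (b, a]. -/
theorem mem_pyRange_of_neg {a b s x : _root_.Int} (hs : s < 0) (hx : x ∈ pyRange a b s) : b < x ∧ x ≤ a ∧ ∃ k : Nat, x = a + s * k := by
  rw [pyRange_of_neg a b hs, _root_.List.mem_map] at hx
  obtain ⟨k, hk, rfl⟩ := hx
  rw [_root_.List.mem_range] at hk
  split at hk
  · rename_i hab
    have hs' : 0 < -s := by omega
    refine ⟨?_, by have := Int.mul_nonneg (Int.le_of_lt hs') (Int.natCast_nonneg k); rw [Int.neg_mul] at this; omega, k, rfl⟩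
    have hk' : (k : _root_.Int) + 1 ≤ (a - b + (-s) - 1) / (-s) := by omega
    have := (Int.le_ediv_iff_mul_le hs').mp hk'
    have e : ((k : _root_.Int) + 1) * (-s) = -(s * k) - s := by rw [Int.add_mul, Int.one_mul, Int.mul_comm, Int.neg_mul]; omega
    omega
  · omega

theorem length_pyRange_of_pos (a b : _root_.Int) {s : _root_.Int} (hs : 0 < s) :
    (pyRange a b s).length = if a < b then ((b - a + s - 1) / s).toNat else 0 := by
  simp [pyRange_of_pos a b hs]
theorem length_pyRange_of_neg (a b : _root_.Int) {s : _root_.Int} (hs : s < 0) :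
    (pyRange a b s).length = if b < a then ((a - b + (-s) - 1) / (-s)).toNat else 0 := by
  simp [pyRange_of_neg a b hs]
/-- membership in range(a, b, s), s > 0: in [a, b) and on the stride. -/
theorem mem_pyRange_iff_of_pos {a b s : _root_.Int} (hs : 0 < s) (x : _root_.Int) : x ∈ pyRange a b s ↔ a ≤ x ∧ x < b ∧ s ∣ (x - a) := by
  constructor
  · intro hx
    obtain ⟨h1, h2, k, hk⟩ := mem_pyRange_of_pos hs hx
    exact ⟨h1, h2, ⟨k, by omega⟩⟩
  · rintro ⟨h1, h2, ⟨c, hc⟩⟩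
    rw [pyRange_of_pos a b hs, _root_.List.mem_map]
    have hc0 : 0 ≤ c := Int.le_of_mul_le_mul_left (a := s) (by omega) hs
    refine ⟨c.toNat, ?_, by rw [Int.toNat_of_nonneg hc0]; omega⟩
    rw [_root_.List.mem_range]
    have hab : a < b := by omega
    simp only [hab, ↓reduceIte]
    have : c + 1 ≤ (b - a + s - 1) / s := (Int.le_ediv_iff_mul_le hs).mpr (by rw [Int.add_mul, Int.one_mul, Int.mul_comm]; omega)
    omega
/-- membership in range(a, b, s), s < 0: in (b, a] and on the stride. -/
theorem mem_pyRange_iff_of_neg {a b s : _root_.Int} (hs : s < 0) (x : _root_.Int) : x ∈ pyRange a b s ↔ b < x ∧ x ≤ a ∧ s ∣ (x - a) := by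
  constructor
  · intro hx
    obtain ⟨h1, h2, k, hk⟩ := mem_pyRange_of_neg hs hx
    exact ⟨h1, h2, ⟨k, by omega⟩⟩
  · rintro ⟨h1, h2, ⟨c, hc⟩⟩
    rw [pyRange_of_neg a b hs, _root_.List.mem_map]
    have hs' : 0 < -s := by omega
    have hc0 : 0 ≤ c := Int.le_of_mul_le_mul_left (a := -s) (by rw [Int.neg_mul, Int.neg_mul]; omega) hs'
    refine ⟨c.toNat, ?_, by rw [Int.toNat_of_nonneg hc0]; omega⟩
    rw [_root_.List.mem_range]
    have hab : b < a := by omega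
    simp only [hab, ↓reduceIte]
    have : c + 1 ≤ (a - b + (-s) - 1) / (-s) := (Int.le_ediv_iff_mul_le hs').mpr (by rw [Int.add_mul, Int.one_mul, Int.mul_comm, Int.neg_mul]; omega)
    omega

/-- Python max(xs, key=key, default=d) / max of a list known non-empty: the FIRST maximal element, d on []. -/
def maxD {κ : Type} [LT κ] [DecidableLT κ] (xs : _root_.List α) (key : α → κ) (d : α) : α := (max? xs key).getD d
/-- Python min(xs, key=key, default=d). -/
def minD {κ : Type} [LT κ] [DecidableLT κ] (xs : _root_.List α) (key : α → κ) (d : α) : α := (min? xs key).getD d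
@[simp] theorem maxD_nil {κ : Type} [LT κ] [DecidableLT κ] (key : α → κ) (d : α) : maxD [] key d = d := rfl
@[simp] theorem minD_nil {κ : Type} [LT κ] [DecidableLT κ] (key : α → κ) (d : α) : minD [] key d = d := rfl
theorem max?_eq_some_maxD {κ : Type} [LT κ] [DecidableLT κ] (xs : _root_.List α) (key : α → κ) (d : α) (h : xs ≠ []) :
    max? xs key = some (maxD xs key d) := by
  unfold maxD
  cases hm : max? xs key with
  | none => exact absurd ((max?_eq_none_iff xs key).mp hm) h
  | some m => rfl
theorem min?_eq_some_minD {κ : Type} [LT κ] [DecidableLT κ] (xs : _root_.List α) (key : α → κ) (d : α) (h : xs ≠ []) :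
    min? xs key = some (minD xs key d) := by
  unfold minD
  cases hm : min? xs key with
  | none => exact absurd ((min?_eq_none_iff xs key).mp hm) h
  | some m => rfl
theorem maxD_mem {κ : Type} [LT κ] [DecidableLT κ] (xs : _root_.List α) (key : α → κ) (d : α) (h : xs ≠ []) : maxD xs key d ∈ xs :=
  max?_mem (max?_eq_some_maxD xs key d h)
theorem minD_mem {κ : Type} [LT κ] [DecidableLT κ] (xs : _root_.List α) (key : α → κ) (d : α) (h : xs ≠ []) : minD xs key d ∈ xs :=
  min?_mem (min?_eq_some_minD xs key d h)

/-- Python 'list(itertools.permutations(xs, r))' as lists, in CPython's order (index-lexicographic; equal elements at different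
positions count as distinct). 'itertools.permutations(xs)' is 'permutations xs xs.length'. r > len gives []. -/
def permutations : _root_.List α → Nat → _root_.List (_root_.List α)
  | _, 0 => [[]]
  | xs, r + 1 => (_root_.List.range xs.length).flatMap fun i =>
      match xs[i]? with
      | none => []
      | some x => (permutations (xs.eraseIdx i) r).map (fun p => x :: p)

@[simp] theorem permutations_zero (xs : _root_.List α) : permutations xs 0 = [[]] := by cases xs <;> rfl
@[simp] theorem permutations_nil_succ (r : Nat) : permutations ([] : _root_.List α) (r + 1) = [] := rfl
theorem permutations_succ (xs : _root_.List α) (r : Nat) :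
    permutations xs (r + 1) = (_root_.List.range xs.length).flatMap (fun i =>
      match xs[i]? with
      | none => []
      | some x => (permutations (xs.eraseIdx i) r).map (fun p => x :: p)) := by
  cases xs <;> rfl

/-- the element at position i, consed onto the list without it, is a permutation of the list. -/
theorem perm_cons_eraseIdx (xs : _root_.List α) {i : Nat} {x : α} (h : xs[i]? = some x) : (x :: xs.eraseIdx i).Perm xs := by
  have hi : i < xs.length := (_root_.List.getElem?_eq_some_iff.mp h).1
  have hx : xs[i] = x := (_root_.List.getElem?_eq_some_iff.mp h).2
  rw [_root_.List.eraseIdx_eq_take_drop_succ]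
  have e : xs = xs.take i ++ x :: xs.drop (i + 1) := by
    conv => lhs; rw [← _root_.List.take_append_drop i xs]
    rw [← hx, _root_.List.getElem_cons_drop]
  conv => rhs; rw [e]
  exact _root_.List.perm_middle.symm

/-- every member of permutations(xs, r) has length r and extends to a permutation of xs. -/
theorem exists_perm_of_mem_permutations : ∀ (r : Nat) (xs p : _root_.List α), p ∈ permutations xs r →
    p.length = r ∧ ∃ rest : _root_.List α, (p ++ rest).Perm xs
  | 0, xs, p, h => by
    rw [permutations_zero, _root_.List.mem_singleton] at h; subst h; exact ⟨rfl, xs, _root_.List.Perm.refl _⟩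
  | r + 1, xs, p, h => by
    rw [permutations_succ, _root_.List.mem_flatMap] at h
    obtain ⟨i, hi, hp⟩ := h
    rw [_root_.List.mem_range] at hi
    have hsome : xs[i]? = some xs[i] := _root_.List.getElem?_eq_getElem hi
    simp only [hsome, _root_.List.mem_map] at hp
    obtain ⟨q, hq, rfl⟩ := hp
    obtain ⟨hlen, rest, hrest⟩ := exists_perm_of_mem_permutations r (xs.eraseIdx i) q hq
    refine ⟨by simp [hlen], rest, ?_⟩
    rw [_root_.List.cons_append]
    exact ((hrest.cons xs[i]).trans (perm_cons_eraseIdx xs hsome))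

theorem length_of_mem_permutations {xs p : _root_.List α} {r : Nat} (h : p ∈ permutations xs r) : p.length = r :=
  (exists_perm_of_mem_permutations r xs p h).1
/-- a member of permutations(xs) (r = len) IS a permutation of xs. -/
theorem perm_of_mem_permutations {xs p : _root_.List α} (h : p ∈ permutations xs xs.length) : p.Perm xs := by
  obtain ⟨hlen, rest, hrest⟩ := exists_perm_of_mem_permutations xs.length xs p h
  have h1 := hrest.length_eq
  rw [_root_.List.length_append, hlen] at h1
  have : rest = [] := _root_.List.length_eq_zero_iff.mp (by omega)
  subst this; simpa using hrest
/-- members of permutations(xs, r) draw their elements from xs. -/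
theorem mem_of_mem_of_mem_permutations {xs p : _root_.List α} {r : Nat} {y : α} (h : p ∈ permutations xs r) (hy : y ∈ p) : y ∈ xs := by
  obtain ⟨_, rest, hrest⟩ := exists_perm_of_mem_permutations r xs p h
  exact hrest.mem_iff.mp (_root_.List.mem_append_left rest hy)
theorem permutations_eq_nil_of_length_lt : ∀ (r : Nat) (xs : _root_.List α), xs.length < r → permutations xs r = []
  | 0, xs, h => absurd h (Nat.not_lt_zero _)
  | r + 1, xs, h => by
    apply _root_.List.eq_nil_iff_forall_not_mem.mpr; intro p hp
    obtain ⟨hlen, rest, hrest⟩ := exists_perm_of_mem_permutations (r + 1) xs p hp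
    have := hrest.length_eq; simp at this; omega

/-- Python bisect.bisect_left(xs, x): CPython's loop exactly (lo = 0, hi = len; while lo < hi: mid = (lo+hi)//2; if xs[mid] < x: lo = mid+1
else: hi = mid), on a fuel of len steps (the loop takes at most that many). Exact on EVERY list; meaningful (the sorted-insertion point) on sorted ones. -/
def bisectLeftLoop [LT α] [DecidableLT α] (xs : _root_.List α) (x : α) : Nat → Nat → Nat → Nat
  | 0, lo, _ => lo
  | fuel + 1, lo, hi =>
    if lo < hi then
      match xs[(lo + hi) / 2]? with
      | some y => if y < x then bisectLeftLoop xs x fuel ((lo + hi) / 2 + 1) hi else bisectLeftLoop xs x fuel lo ((lo + hi) / 2)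
      | none => lo
    else lo
def bisectLeft [LT α] [DecidableLT α] (xs : _root_.List α) (x : α) : Nat := bisectLeftLoop xs x xs.length 0 xs.length
/-- Python bisect.bisect_right(xs, x) (= bisect.bisect): as bisect_left with the test 'x < xs[mid]' choosing the left half. -/
def bisectRightLoop [LT α] [DecidableLT α] (xs : _root_.List α) (x : α) : Nat → Nat → Nat → Nat
  | 0, lo, _ => lo
  | fuel + 1, lo, hi =>
    if lo < hi then
      match xs[(lo + hi) / 2]? with
      | some y => if x < y then bisectRightLoop xs x fuel lo ((lo + hi) / 2) else bisectRightLoop xs x fuel ((lo + hi) / 2 + 1) hi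
      | none => lo
    else lo
def bisectRight [LT α] [DecidableLT α] (xs : _root_.List α) (x : α) : Nat := bisectRightLoop xs x xs.length 0 xs.length
@[simp] theorem bisectLeft_nil [LT α] [DecidableLT α] (x : α) : bisectLeft ([] : _root_.List α) x = 0 := rfl
@[simp] theorem bisectRight_nil [LT α] [DecidableLT α] (x : α) : bisectRight ([] : _root_.List α) x = 0 := rfl
/-- the loop invariant of bisect_left on a SORTED Int list: everything left of the result is < x, everything from it on is ≥ x. -/
theorem bisectLeftLoop_spec (xs : _root_.List _root_.Int) (x : _root_.Int) (hs : xs.Pairwise (· ≤ ·)) :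
    ∀ (fuel lo hi : Nat), lo ≤ hi → hi ≤ xs.length → hi - lo ≤ fuel →
      (∀ (j : Nat) (hj : j < xs.length), j < lo → xs[j] < x) → (∀ (j : Nat) (hj : j < xs.length), hi ≤ j → x ≤ xs[j]) →
      lo ≤ bisectLeftLoop xs x fuel lo hi ∧ bisectLeftLoop xs x fuel lo hi ≤ hi ∧
      (∀ (j : Nat) (hj : j < xs.length), j < bisectLeftLoop xs x fuel lo hi → xs[j] < x) ∧
      (∀ (j : Nat) (hj : j < xs.length), bisectLeftLoop xs x fuel lo hi ≤ j → x ≤ xs[j]) := by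
  have hmono : ∀ (i j : Nat) (hi : i < xs.length) (hj : j < xs.length), i ≤ j → xs[i] ≤ xs[j] := by
    intro i j hi hj hij
    rcases Nat.lt_or_eq_of_le hij with h | h
    · exact _root_.List.pairwise_iff_getElem.mp hs i j hi hj h
    · subst h; exact Int.le_refl _
  intro fuel
  induction fuel with
  | zero =>
    intro lo hi h1 h2 h3 hL hR
    have e : lo = hi := by omega
    subst e
    simp only [bisectLeftLoop]
    exact ⟨Nat.le_refl _, Nat.le_refl _, fun j hj h => hL j hj h, fun j hj h => hR j hj h⟩
  | succ fuel ih =>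
    intro lo hi h1 h2 h3 hL hR
    simp only [bisectLeftLoop]
    by_cases hlt : lo < hi
    · simp only [hlt, ↓reduceIte]
      have hmid : (lo + hi) / 2 < xs.length := by omega
      rw [_root_.List.getElem?_eq_getElem hmid]
      simp only
      by_cases hy : xs[(lo + hi) / 2] < x
      · simp only [hy, ↓reduceIte]
        have := ih ((lo + hi) / 2 + 1) hi (by omega) h2 (by omega)
          (fun j hj hjl => by have := hmono j ((lo + hi) / 2) hj hmid (by omega); omega) hR
        exact ⟨by omega, this.2.1, this.2.2.1, this.2.2.2⟩
      · simp only [hy, ↓reduceIte]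
        have := ih lo ((lo + hi) / 2) (by omega) (by omega) (by omega) hL
          (fun j hj hjm => by have := hmono ((lo + hi) / 2) j hmid hj hjm; omega)
        exact ⟨this.1, by omega, this.2.2.1, this.2.2.2⟩
    · simp only [hlt, ↓reduceIte]
      have e : lo = hi := by omega
      subst e
      exact ⟨Nat.le_refl _, Nat.le_refl _, fun j hj h => hL j hj h, fun j hj h => hR j hj h⟩

/-- bisect_left on a sorted Int list: the insertion point — all of xs[:r] < x ≤ all of xs[r:], r ≤ len. -/
theorem bisectLeft_spec (xs : _root_.List _root_.Int) (x : _root_.Int) (hs : xs.Pairwise (· ≤ ·)) :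
    bisectLeft xs x ≤ xs.length ∧ (∀ (j : Nat) (hj : j < xs.length), j < bisectLeft xs x → xs[j] < x) ∧
      (∀ (j : Nat) (hj : j < xs.length), bisectLeft xs x ≤ j → x ≤ xs[j]) := by
  have h := bisectLeftLoop_spec xs x hs xs.length 0 xs.length (by omega) (by omega) (by omega) (fun _ _ h => absurd h (Nat.not_lt_zero _)) (fun j hj h => by omega)
  exact ⟨h.2.1, h.2.2.1, h.2.2.2⟩

theorem bisectRightLoop_spec (xs : _root_.List _root_.Int) (x : _root_.Int) (hs : xs.Pairwise (· ≤ ·)) :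
    ∀ (fuel lo hi : Nat), lo ≤ hi → hi ≤ xs.length → hi - lo ≤ fuel →
      (∀ (j : Nat) (hj : j < xs.length), j < lo → xs[j] ≤ x) → (∀ (j : Nat) (hj : j < xs.length), hi ≤ j → x < xs[j]) →
      lo ≤ bisectRightLoop xs x fuel lo hi ∧ bisectRightLoop xs x fuel lo hi ≤ hi ∧
      (∀ (j : Nat) (hj : j < xs.length), j < bisectRightLoop xs x fuel lo hi → xs[j] ≤ x) ∧
      (∀ (j : Nat) (hj : j < xs.length), bisectRightLoop xs x fuel lo hi ≤ j → x < xs[j]) := by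
  have hmono : ∀ (i j : Nat) (hi : i < xs.length) (hj : j < xs.length), i ≤ j → xs[i] ≤ xs[j] := by
    intro i j hi hj hij
    rcases Nat.lt_or_eq_of_le hij with h | h
    · exact _root_.List.pairwise_iff_getElem.mp hs i j hi hj h
    · subst h; exact Int.le_refl _
  intro fuel
  induction fuel with
  | zero =>
    intro lo hi h1 h2 h3 hL hR
    have e : lo = hi := by omega
    subst e
    simp only [bisectRightLoop]
    exact ⟨Nat.le_refl _, Nat.le_refl _, fun j hj h => hL j hj h, fun j hj h => hR j hj h⟩
  | succ fuel ih =>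
    intro lo hi h1 h2 h3 hL hR
    simp only [bisectRightLoop]
    by_cases hlt : lo < hi
    · simp only [hlt, ↓reduceIte]
      have hmid : (lo + hi) / 2 < xs.length := by omega
      rw [_root_.List.getElem?_eq_getElem hmid]
      simp only
      by_cases hy : x < xs[(lo + hi) / 2]
      · simp only [hy, ↓reduceIte]
        have := ih lo ((lo + hi) / 2) (by omega) (by omega) (by omega) hL
          (fun j hj hjm => by have := hmono ((lo + hi) / 2) j hmid hj hjm; omega)
        exact ⟨this.1, by omega, this.2.2.1, this.2.2.2⟩
      · simp only [hy, ↓reduceIte]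
        have := ih ((lo + hi) / 2 + 1) hi (by omega) h2 (by omega)
          (fun j hj hjl => by have := hmono j ((lo + hi) / 2) hj hmid (by omega); omega) hR
        exact ⟨by omega, this.2.1, this.2.2.1, this.2.2.2⟩
    · simp only [hlt, ↓reduceIte]
      have e : lo = hi := by omega
      subst e
      exact ⟨Nat.le_refl _, Nat.le_refl _, fun j hj h => hL j hj h, fun j hj h => hR j hj h⟩

/-- bisect_right on a sorted Int list: all of xs[:r] ≤ x < all of xs[r:], r ≤ len. -/
theorem bisectRight_spec (xs : _root_.List _root_.Int) (x : _root_.Int) (hs : xs.Pairwise (· ≤ ·)) :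
    bisectRight xs x ≤ xs.length ∧ (∀ (j : Nat) (hj : j < xs.length), j < bisectRight xs x → xs[j] ≤ x) ∧
      (∀ (j : Nat) (hj : j < xs.length), bisectRight xs x ≤ j → x < xs[j]) := by
  have h := bisectRightLoop_spec xs x hs xs.length 0 xs.length (by omega) (by omega) (by omega) (fun _ _ h => absurd h (Nat.not_lt_zero _)) (fun j hj h => by omega)
  exact ⟨h.2.1, h.2.2.1, h.2.2.2⟩

end Pack6

end List

end PySem
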